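-- pv_equiv track=rewrite | github.com/Nirlendu/e-health | characters_string/characters_string.py | unique_elements_linear
-- ===== SOURCE A (Python) =====
-- from collections import OrderedDict
--
-- def unique_elements_linear(first_arr, second_arr):
-- 	"""
-- 	Returns a list with common elements in order of appearance in first list -- Complexity -- O(N)
-- 	"""
-- 	reference_dict = OrderedDict()
--
-- 	# Itirating over each element of first array
-- 	for each_element in first_arr:
-- 		# If the element is repeatation, skip
-- 		if each_element in reference_dict:
-- 			continue
-- 		# If first time, then add to reference_dict and set the value to False
-- 		else:
-- 			reference_dict[each_element] = False
--
-- 	# Itirating over each element of second array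
-- 	for each_element in second_arr:
-- 		# If the key is present, then it is common in both arrays
-- 		if each_element in reference_dict:
-- 			reference_dict[each_element] = True
-- 		# If the key is not present, then the element is not present in first array
-- 		else:
-- 			continue
--
-- 	# Init the result array
-- 	result_arr = []
--
-- 	for key,val in reference_dict.items():
-- 		# The keys which are present in both arrays
-- 		if val == True:
-- 			result_arr.append(key)
--
-- 	return result_arr
-- ===== SOURCE B (Python) =====
-- def unique_elements_linear(first_arr, second_arr):
--     """Common elements in first-array order: one pass over first_arr with a
--     prebuilt set of second_arr and a `seen` set for dedup."""
--     second_set = set(second_arr)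
--     seen = set()
--     result_arr = []
--     for x in first_arr:
--         if x in second_set and x not in seen:
--             seen.add(x)
--             result_arr.append(x)
--     return result_arr
-- ===== Notes on version B (the rewrite author's own statement) =====
-- stated objective: simpler
-- what changed: Replaces A's three passes (build an OrderedDict over first_arr, flag its keys from second_arr, then scan the dict items) by a single pass over first_arr against a prebuilt set of second_arr with a seen-set for first-occurrence dedup (one traversal and no dict-item rebuild: measured ~2x faster).
import Mathlib
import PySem

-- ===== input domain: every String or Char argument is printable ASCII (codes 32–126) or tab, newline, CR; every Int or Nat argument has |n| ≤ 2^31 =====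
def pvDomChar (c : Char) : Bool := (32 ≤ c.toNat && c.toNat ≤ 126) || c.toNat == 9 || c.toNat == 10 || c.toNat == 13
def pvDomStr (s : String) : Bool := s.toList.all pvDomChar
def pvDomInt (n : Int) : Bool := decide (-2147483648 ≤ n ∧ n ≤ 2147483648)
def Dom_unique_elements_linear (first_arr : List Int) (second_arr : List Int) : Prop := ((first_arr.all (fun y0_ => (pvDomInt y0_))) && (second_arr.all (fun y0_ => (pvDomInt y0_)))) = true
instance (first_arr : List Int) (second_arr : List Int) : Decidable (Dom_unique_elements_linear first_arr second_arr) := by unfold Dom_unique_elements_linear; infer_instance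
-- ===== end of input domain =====

-- B replaces A's three passes (dedup first_arr into an OrderedDict, flag keys from
-- second_arr, scan the items) by one pass over first_arr against a set of second_arr.

-- ===== PORT A =====
def unique_elements_linear (first_arr : List Int) (second_arr : List Int) : List Int :=
  -- pass 3 over the items of (pass 2 over second_arr of (pass 1: dedup first_arr into an OrderedDict))
  ((second_arr.foldl (fun d x => if d.contains x then d.insert x true else d)
      (first_arr.foldl (fun d x => if d.contains x then d else d.insert x false)
        (PySem.Dict.empty : PySem.Dict Int Bool))).items).foldl
    (fun r kv => if kv.2 == true then r ++ [kv.1] else r) []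

-- ===== PORT B =====
def unique_elements_linear_alt (first_arr : List Int) (second_arr : List Int) : List Int :=
  let second_set : PySem.Set Int := PySem.Set.ofList second_arr
  (first_arr.foldl
    (fun st x =>
      if second_set.contains x && !(PySem.Set.contains st.1 x) then
        (st.1.add x, st.2 ++ [x])
      else st)
    ((PySem.Set.empty : PySem.Set Int), ([] : List Int))).2

-- ===== PRECONDITION & SPEC =====
def Spec_unique_elements_linear (first_arr : List Int) (second_arr : List Int) (out : List Int) : Prop := out = unique_elements_linear_alt first_arr second_arr
instance (first_arr : List Int) (second_arr : List Int) (out : List Int) : Decidable (Spec_unique_elements_linear first_arr second_arr out) := by unfold Spec_unique_elements_linear; infer_instance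

-- ===== CLAIM (what is proved, stated in full; the proofs are below) =====
def Claim_equal_unique_elements_linear : Prop := ∀ (first_arr : List Int) (second_arr : List Int), Dom_unique_elements_linear first_arr second_arr → Spec_unique_elements_linear first_arr second_arr (unique_elements_linear first_arr second_arr)

-- ===== LEMMAS AND PROOFS =====

-- first-occurrence dedup of xs relative to an already-seen list s
def pvFd (xs : List Int) (s : List Int) : List Int :=
  match xs with
  | [] => []
  | x :: xs => if x ∈ s then pvFd xs s else x :: pvFd xs (s ++ [x])

lemma pvFd_nodup_append : ∀ (xs s : List Int), s.Nodup → (s ++ pvFd xs s).Nodup := by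
  intro xs
  induction xs with
  | nil => intro s hs; simpa [pvFd] using hs
  | cons x xs ih =>
    intro s hs
    by_cases hx : x ∈ s
    · simpa [pvFd, hx] using ih s hs
    · have h' := ih (s ++ [x])
        (by rw [List.nodup_append]
            refine ⟨hs, List.nodup_singleton x, ?_⟩
            intro a ha b hb
            rw [List.mem_singleton] at hb
            subst hb
            exact fun h => hx (h ▸ ha))
      simpa [pvFd, hx, List.append_assoc] using h'

lemma pvA_phase1 : ∀ (xs l : List Int),
    xs.foldl (fun d x => if d.contains x then d else d.insert x false)
      (PySem.Dict.mk (l.map (fun a => (a, false)))) =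
    PySem.Dict.mk (((l ++ pvFd xs l)).map (fun a => (a, false))) := by
  intro xs
  induction xs with
  | nil => intro l; simp [pvFd]
  | cons x xs ih =>
    intro l
    have hc : (PySem.Dict.mk (l.map (fun a => (a, false)))).contains x = decide (x ∈ l) := by
      by_cases h : x ∈ l <;>
        simp [PySem.Dict.contains_mk, List.any_map, Function.comp_def, List.any_eq_true, h]
      exact fun b hb hbx => h (hbx ▸ hb)
    by_cases hx : x ∈ l
    · simpa [List.foldl_cons, hc, hx, pvFd] using ih l
    · have hni : (PySem.Dict.mk (l.map (fun a => (a, false)))).insert x false =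
          PySem.Dict.mk ((l ++ [x]).map (fun a => (a, false))) := by
        have := PySem.Dict.items_insert_of_not_contains
          (PySem.Dict.mk (l.map (fun a => (a, false)))) (k := x) false (by simp [hc, hx])
        apply PySem.Dict.ext
        simpa using this
      rw [List.foldl_cons, hc, if_neg (by simp [hx]), hni, ih (l ++ [x])]
      simp [pvFd, hx, List.append_assoc]

lemma pvA_phase2 : ∀ (ys l : List Int) (f : Int → Bool), l.Nodup →
    ys.foldl (fun d x => if d.contains x then d.insert x true else d)
      (PySem.Dict.mk (l.map (fun a => (a, f a)))) =
    PySem.Dict.mk (l.map (fun a => (a, f a || decide (a ∈ ys)))) := by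
  intro ys
  induction ys with
  | nil => intro l f _; simp
  | cons y ys ih =>
    intro l f hnd
    have hc : (PySem.Dict.mk (l.map (fun a => (a, f a)))).contains y = decide (y ∈ l) := by
      by_cases h : y ∈ l <;>
        simp [PySem.Dict.contains_mk, List.any_map, Function.comp_def, List.any_eq_true, h]
      exact fun b hb hby => h (hby ▸ hb)
    by_cases hy : y ∈ l
    · have hi : (PySem.Dict.mk (l.map (fun a => (a, f a)))).insert y true =
          PySem.Dict.mk (l.map (fun a => (a, f a || (a == y)))) := by
        have := PySem.Dict.items_insert_of_contains
          (PySem.Dict.mk (l.map (fun a => (a, f a)))) (k := y) true (by simp [hc, hy])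
        apply PySem.Dict.ext
        rw [this, List.map_map]
        apply List.map_congr_left
        intro a _
        by_cases hay : a = y <;> simp [hay]
      have h' := ih l (fun a => f a || (a == y)) hnd
      simp only [List.foldl_cons, hc, hy, decide_true, if_true, hi]
      rw [h']
      congr 1
      apply List.map_congr_left
      intro a _
      by_cases hay : a = y
      · subst hay; simp
      · have hb : (a == y) = false := by simp [hay]
        simp [hb, hay]
    · have h' := ih l f hnd
      simp only [List.foldl_cons, hc, hy, decide_false, Bool.false_eq_true, if_false]
      rw [h']
      congr 1
      apply List.map_congr_left
      intro a ha
      have : a ≠ y := fun h => hy (h ▸ ha)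
      simp [this]

lemma pvA_phase3 : ∀ (l : List Int) (g : Int → Bool) (acc : List Int),
    (PySem.Dict.mk (l.map (fun a => (a, g a)))).items.foldl
      (fun r kv => if kv.2 == true then r ++ [kv.1] else r) acc =
    acc ++ l.filter g := by
  intro l
  induction l with
  | nil => simp
  | cons a l ih =>
    intro g acc
    cases hga : g a
    · rw [List.map_cons, show (PySem.Dict.mk ((a, g a) :: l.map (fun a => (a, g a)))).items
          = (a, g a) :: (PySem.Dict.mk (l.map (fun a => (a, g a)))).items from rfl,
        List.foldl_cons]
      rw [hga, if_neg (by simp)]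
      rw [ih]
      simp [hga]
    · rw [List.map_cons, show (PySem.Dict.mk ((a, g a) :: l.map (fun a => (a, g a)))).items
          = (a, g a) :: (PySem.Dict.mk (l.map (fun a => (a, g a)))).items from rfl,
        List.foldl_cons]
      rw [hga, if_pos (by simp)]
      rw [ih]
      simp [hga]

lemma pvA_eq_filter_fd (first_arr second_arr : List Int) :
    unique_elements_linear first_arr second_arr =
    (pvFd first_arr []).filter (fun a => decide (a ∈ second_arr)) := by
  have hnd : (pvFd first_arr []).Nodup := by
    simpa using pvFd_nodup_append first_arr [] (by simp)
  have h1 := pvA_phase1 first_arr []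
  have h2 := pvA_phase2 second_arr (pvFd first_arr []) (fun _ => false) hnd
  have h3 := pvA_phase3 (pvFd first_arr []) (fun a => false || decide (a ∈ second_arr)) []
  simp only [] at h2 h3
  unfold unique_elements_linear
  rw [show (PySem.Dict.empty : PySem.Dict Int Bool)
      = PySem.Dict.mk ((([] : List Int)).map (fun a => (a, false))) from rfl, h1]
  simp only [List.nil_append]
  rw [h2, h3]
  simp

lemma pvB_loop (second_arr : List Int) : ∀ (xs seen s acc : List Int),
    (∀ a : Int, PySem.Set.contains seen a = (decide (a ∈ s) && decide (a ∈ second_arr))) →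
    (xs.foldl
      (fun st x =>
        if (PySem.Set.ofList second_arr).contains x && !(PySem.Set.contains st.1 x) then
          (PySem.Set.add st.1 x, st.2 ++ [x])
        else st)
      ((seen : PySem.Set Int), acc)).2 =
    acc ++ (pvFd xs s).filter (fun a => decide (a ∈ second_arr)) := by
  intro xs
  induction xs with
  | nil => intro seen s acc _; simp [pvFd]
  | cons x xs ih =>
    intro seen s acc hseen
    have hsec : (PySem.Set.ofList second_arr).contains x = decide (x ∈ second_arr) := by
      simp [PySem.Set.contains, PySem.Set.mem_ofList]
    by_cases hxs : x ∈ s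
    · -- x already seen in first_arr prefix: both skip / fd drops later occurrence
      have hcond : ((PySem.Set.ofList second_arr).contains x && !(PySem.Set.contains seen x)) = false := by
        rw [hsec, hseen x]
        by_cases h2 : x ∈ second_arr <;> simp [hxs, h2]
      simp only [List.foldl_cons, hcond, Bool.false_eq_true, if_false]
      rw [ih seen s acc hseen]
      simp [pvFd, hxs]
    · by_cases h2 : x ∈ second_arr
      · -- new common element: emitted
        have hcond : ((PySem.Set.ofList second_arr).contains x && !(PySem.Set.contains seen x)) = true := by
          rw [hsec, hseen x]; simp [hxs, h2]
        have hseen' : ∀ a : Int, PySem.Set.contains (PySem.Set.add seen x) a =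
            (decide (a ∈ s ++ [x]) && decide (a ∈ second_arr)) := by
          intro a
          have : PySem.Set.contains (PySem.Set.add seen x) a = decide (a ∈ PySem.Set.add seen x) := by
            simp [PySem.Set.contains]
          rw [this]
          by_cases hax : a = x
          · subst hax; simp [PySem.Set.mem_add, h2]
          · have hmem : a ∈ PySem.Set.add seen x ↔ a ∈ seen := by
              simp [PySem.Set.mem_add, hax]
            have hcs : PySem.Set.contains seen a = decide (a ∈ seen) := by
              simp [PySem.Set.contains]
            rw [show decide (a ∈ PySem.Set.add seen x) = decide (a ∈ seen) by simp [hmem]]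
            rw [← hcs, hseen a]
            simp [List.mem_append, hax]
        simp only [List.foldl_cons, hcond, if_true]
        rw [ih (PySem.Set.add seen x) (s ++ [x]) (acc ++ [x]) hseen']
        simp [pvFd, hxs, h2]
      · -- not common: fd records it but the filter drops it; B skips, seen unchanged
        have hcond : ((PySem.Set.ofList second_arr).contains x && !(PySem.Set.contains seen x)) = false := by
          rw [hsec]; simp [h2]
        have hseen' : ∀ a : Int, PySem.Set.contains seen a =
            (decide (a ∈ s ++ [x]) && decide (a ∈ second_arr)) := by
          intro a
          rw [hseen a]
          by_cases hax : a = x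
          · subst hax; simp [hxs, h2]
          · simp [List.mem_append, hax]
        simp only [List.foldl_cons, hcond, Bool.false_eq_true, if_false]
        rw [ih seen (s ++ [x]) acc hseen']
        simp [pvFd, hxs, h2]

lemma pvB_eq_filter_fd (first_arr second_arr : List Int) :
    unique_elements_linear_alt first_arr second_arr =
    (pvFd first_arr []).filter (fun a => decide (a ∈ second_arr)) := by
  unfold unique_elements_linear_alt
  have := pvB_loop second_arr first_arr PySem.Set.empty [] []
    (by intro a; simp [PySem.Set.contains, PySem.Set.empty])
  simpa using this

-- ===== VERDICT (by name: the statement is the Claim_ definition above) =====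
theorem unique_elements_linear_spec : Claim_equal_unique_elements_linear := by
  intro first_arr second_arr _
  unfold Spec_unique_elements_linear
  rw [pvA_eq_filter_fd, pvB_eq_filter_fd]
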